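-- pv_equiv track=rewrite | github.com/Rafasanna/parcial1 | ParcialAlgoritmos.py/p2parcial.py | Contar_Descubridores
-- ===== SOURCE A (Python) =====
-- class Stack:
--
--     def __init__(self):
--         self.__elements = []
--
--     def push(self, element):
--         self.__elements.append(element)
--
--     def pop(self):
--         if len(self.__elements) > 0:
--             return self.__elements.pop()
--         else:
--             return None
--
--     def on_top(self):
--         if len(self.__elements) > 0:
--             return self.__elements[-1]
--         else:
--             return None
--
--     def size(self):
--         return len(self.__elements)
--
-- def Contar_Descubridores(lista):
--     pila = Stack()
--     for dinosaurio in lista: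
--         pila.push(dinosaurio)
--     descubridores = set()
--     while pila.size() > 0:
--         dinosaurio = pila.pop()
--         descubridores.add(dinosaurio["descubridor"])
--     return len(descubridores)
-- ===== SOURCE B (Python) =====
-- def Contar_Descubridores(lista):
--     return len({dinosaurio["descubridor"] for dinosaurio in lista})
-- ===== Notes on version B (the rewrite author's own statement) =====
-- stated objective: simpler
-- what changed: Drops the Stack class and its push-all/pop-all round trip: B computes the answer in one forward pass as the length of a set comprehension, maintaining no auxiliary stack.
import Mathlib
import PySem

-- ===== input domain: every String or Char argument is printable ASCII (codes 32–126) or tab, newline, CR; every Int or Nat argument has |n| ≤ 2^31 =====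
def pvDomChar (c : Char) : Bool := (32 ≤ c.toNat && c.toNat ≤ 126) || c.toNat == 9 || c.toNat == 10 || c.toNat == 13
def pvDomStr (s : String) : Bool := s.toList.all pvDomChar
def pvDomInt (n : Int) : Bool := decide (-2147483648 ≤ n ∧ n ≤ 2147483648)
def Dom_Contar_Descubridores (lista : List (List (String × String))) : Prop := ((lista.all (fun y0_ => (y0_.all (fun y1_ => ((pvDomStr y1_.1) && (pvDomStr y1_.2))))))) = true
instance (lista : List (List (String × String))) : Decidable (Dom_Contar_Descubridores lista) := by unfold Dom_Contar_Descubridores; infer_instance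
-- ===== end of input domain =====

-- B drops A's Stack round trip (push all, pop all) and returns len of a set comprehension in one forward pass (objective: simpler).


-- ===== PORT A =====
-- Stack: push appends to the end; pop takes from the end. The while-pop loop consumes the
-- stack last-pushed-first, i.e. it is a fold over the reverse of the pushed list.
-- Dict.getD is the total form of dinosaurio["descubridor"]; Pre_ guarantees the key is present
-- (Python raises KeyError exactly when it is not).
def Contar_Descubridores (lista : List (List (String × String))) : Int :=
  let pila : List (List (String × String)) :=
    lista.foldl (fun p dinosaurio => p ++ [dinosaurio]) []
  let descubridores : PySem.Set String :=
    pila.reverse.foldl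
      (fun s dinosaurio =>
        PySem.Set.add s (PySem.Dict.getD (PySem.Dict.mk dinosaurio) "descubridor" ""))
      PySem.Set.empty
  PySem.Set.len descubridores

-- ===== PORT B =====
-- len({d["descubridor"] for d in lista}) : one pass, no stack.
def Contar_Descubridores_alt (lista : List (List (String × String))) : Int :=
  PySem.Set.len
    (PySem.Set.ofList
      (lista.map (fun dinosaurio =>
        PySem.Dict.getD (PySem.Dict.mk dinosaurio) "descubridor" "")))

-- ===== PRECONDITION & SPEC =====
-- Pre_ excludes exactly the inputs where some dict lacks the key "descubridor": there Python A
-- (and B) raise KeyError.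
def Pre_Contar_Descubridores (lista : List (List (String × String))) : Prop :=
  ∀ d ∈ lista, (PySem.Dict.mk d).contains "descubridor" = true
instance (lista : List (List (String × String))) : Decidable (Pre_Contar_Descubridores lista) := by unfold Pre_Contar_Descubridores; infer_instance

def pvWitness_Contar_Descubridores : (List (List (String × String))) :=
  [[("nombre", "rex"), ("descubridor", "Owen")], [("descubridor", "Grant")]]

def Spec_Contar_Descubridores (lista : List (List (String × String))) (out : Int) : Prop := out = Contar_Descubridores_alt lista
instance (lista : List (List (String × String))) (out : Int) : Decidable (Spec_Contar_Descubridores lista out) := by unfold Spec_Contar_Descubridores; infer_instance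

-- ===== CLAIM (what is proved, stated in full; the proofs are below) =====
def Claim_equal_Contar_Descubridores : Prop := ∀ (lista : List (List (String × String))), Dom_Contar_Descubridores lista → Pre_Contar_Descubridores lista → Spec_Contar_Descubridores lista (Contar_Descubridores lista)

-- ===== LEMMAS AND PROOFS =====

-- A deduplicated (Nodup) list of values has as many elements as the finite set of its members.
theorem pv_len_ofList_eq_card (l : List String) :
    (PySem.Set.ofList l).length = l.toFinset.card := by
  rw [← List.toFinset_card_of_nodup (PySem.Set.nodup_ofList l)]
  congr 1
  ext x
  simp [PySem.Set.mem_ofList]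

-- ===== VERDICT (by name: the statement is the Claim_ definition above) =====
theorem Contar_Descubridores_spec : Claim_equal_Contar_Descubridores := by
  intro lista _ _
  show Contar_Descubridores lista = Contar_Descubridores_alt lista
  unfold Contar_Descubridores Contar_Descubridores_alt
  dsimp only
  rw [PySem.List.foldl_append_singleton, List.nil_append,
      ← PySem.Set.update_map_eq_foldl_add, List.map_reverse,
      PySem.Set.update_empty]
  unfold PySem.Set.len
  congr 1
  rw [pv_len_ofList_eq_card, pv_len_ofList_eq_card, List.toFinset_reverse]
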